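-- pv_equiv track=rewrite | github.com/jules-jo/test-daemon | src/jules_daemon/execution/knowledge_extractor.py | _coerce_failures
-- ===== SOURCE A (Python) =====
-- from typing import Any, Optional
--
-- _MAX_FIELD_CHARS: int = 600
--
-- _MAX_FAILURES_PER_RUN: int = 5
--
-- def _coerce_field(value: Any) -> str:
--     """Coerce a JSON value to a trimmed, length-bounded string."""
--     if not isinstance(value, str):
--         return ""
--     cleaned = value.strip()
--     if len(cleaned) > _MAX_FIELD_CHARS:
--         cleaned = cleaned[: _MAX_FIELD_CHARS - 3] + "..."
--     return cleaned
--
-- def _coerce_failures(value: Any) -> list[str]: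
--     """Coerce the ``common_failures`` field into a bounded list."""
--     if not isinstance(value, list):
--         return []
--     out: list[str] = []
--     for item in value:
--         text = _coerce_field(item)
--         if not text:
--             continue
--         if text not in out:
--             out.append(text)
--         if len(out) >= _MAX_FAILURES_PER_RUN:
--             break
--     return out
-- ===== SOURCE B (Python) =====
-- from typing import Any
--
-- _MAX_FIELD_CHARS: int = 600
--
-- _MAX_FAILURES_PER_RUN: int = 5
--
--
-- def _coerce_field(value: Any) -> str:
--     """Coerce a JSON value to a trimmed, length-bounded string."""
--     if not isinstance(value, str):
--         return ""
--     cleaned = value.strip()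
--     if len(cleaned) > _MAX_FIELD_CHARS:
--         cleaned = cleaned[: _MAX_FIELD_CHARS - 3] + "..."
--     return cleaned
--
--
-- def _coerce_failures(value: Any) -> list[str]:
--     """Coerce the ``common_failures`` field into a bounded list."""
--     if not isinstance(value, list):
--         return []
--     coerced = [c for item in value if (c := _coerce_field(item))]
--     return list(dict.fromkeys(coerced))[:_MAX_FAILURES_PER_RUN]
-- ===== Notes on version B (the rewrite author's own statement) =====
-- stated objective: idiomatic
-- what changed: Replaces the single accumulating loop with its inline 'text not in out' scan and early break by a three-stage pipeline: a comprehension of non-empty coerced strings, order-preserving dedup via dict.fromkeys, and a [:5] slice for the cap.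
import Mathlib
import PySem

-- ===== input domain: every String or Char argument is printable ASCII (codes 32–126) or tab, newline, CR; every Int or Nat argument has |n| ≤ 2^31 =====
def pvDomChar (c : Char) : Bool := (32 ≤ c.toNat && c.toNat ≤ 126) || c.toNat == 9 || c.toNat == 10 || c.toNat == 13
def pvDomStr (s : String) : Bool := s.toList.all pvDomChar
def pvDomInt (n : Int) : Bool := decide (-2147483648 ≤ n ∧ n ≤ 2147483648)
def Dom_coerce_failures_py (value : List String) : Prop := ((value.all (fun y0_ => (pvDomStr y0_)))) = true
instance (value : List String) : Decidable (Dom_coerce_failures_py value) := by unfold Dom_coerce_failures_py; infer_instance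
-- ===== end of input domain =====

-- B replaces A's single accumulating loop (inline membership scan + early break) by a
-- map/filter → ordered-dedup → take-5 pipeline; same results, more idiomatic.


-- ===== PORT A =====
-- _coerce_field (shared helper, reused verbatim by B): the isinstance(str) branch is
-- always taken since the argument is typed String.
def coerce_field_py (value : String) : String :=
  let cleaned := PySem.Str.strip value
  if 600 < PySem.Str.len cleaned then
    PySem.Str.slice cleaned none (some (600 - 3)) ++ "..."
  else cleaned

-- the 'for item in value' loop of A, with its accumulator and early break
def coerce_failures_loop : List String → List String → List String
  | [], out => out
  | item :: rest, out =>
    let text := coerce_field_py item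
    if text = "" then coerce_failures_loop rest out
    else
      let out' := if text ∈ out then out else out ++ [text]
      if 5 ≤ out'.length then out' else coerce_failures_loop rest out'

def coerce_failures_py (value : List String) : List String :=
  coerce_failures_loop value []

-- ===== PORT B =====
def coerce_failures_py_alt (value : List String) : List String :=
  let coerced := (value.map coerce_field_py).filter (fun c => c ≠ "")
  PySem.List.slice (PySem.List.dedup coerced) none (some 5)

-- ===== PRECONDITION & SPEC =====
def Spec_coerce_failures_py (value : List String) (out : List String) : Prop := out = coerce_failures_py_alt value
instance (value : List String) (out : List String) : Decidable (Spec_coerce_failures_py value out) := by unfold Spec_coerce_failures_py; infer_instance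

-- ===== CLAIM (what is proved, stated in full; the proofs are below) =====
def Claim_equal_coerce_failures_py : Prop := ∀ (value : List String), Dom_coerce_failures_py value → Spec_coerce_failures_py value (coerce_failures_py value)

-- ===== LEMMAS AND PROOFS =====

-- Set.add only ever appends, so a foldl of adds extends its accumulator on the right
lemma foldl_add_eq_append_suffix (xs : List String) (s : List String) :
    ∃ t, xs.foldl PySem.Set.add s = s ++ t := by
  induction xs generalizing s with
  | nil => exact ⟨[], by simp⟩
  | cons x xs ih =>
    simp only [List.foldl_cons]
    rcases ih (PySem.Set.add s x) with ⟨t, ht⟩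
    by_cases h : x ∈ s
    · exact ⟨t, by simpa [PySem.Set.add, PySem.Set.contains, h] using ht⟩
    · exact ⟨x :: t, by simpa [PySem.Set.add, PySem.Set.contains, h] using ht⟩

-- loop invariant: while the accumulator is still below the cap, A's loop computes the
-- ordered dedup-extension of the accumulator by the non-empty coerced items, cut at 5
lemma loop_eq (items : List String) (out : List String) (h : out.length < 5) :
    coerce_failures_loop items out =
      (((items.map coerce_field_py).filter (fun c => c ≠ "")).foldl PySem.Set.add out).take 5 := by
  induction items generalizing out with
  | nil =>
    simp [coerce_failures_loop, List.take_of_length_le (Nat.le_of_lt h)]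
  | cons item rest ih =>
    simp only [coerce_failures_loop, List.map_cons]
    by_cases he : coerce_field_py item = ""
    · simp [he, ih out h]
    · rw [if_neg he]
      have hfilter : (coerce_field_py item :: rest.map coerce_field_py).filter (fun c => c ≠ "") =
          coerce_field_py item :: (rest.map coerce_field_py).filter (fun c => c ≠ "") := by
        simp [he]
      rw [hfilter, List.foldl_cons]
      by_cases hm : coerce_field_py item ∈ out
      · have hadd : PySem.Set.add out (coerce_field_py item) = out := by
          simp [PySem.Set.add, PySem.Set.contains, hm]
        rw [if_pos hm, if_neg (by omega), hadd, ih out h]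
      · have hadd : PySem.Set.add out (coerce_field_py item) = out ++ [coerce_field_py item] := by
          simp [PySem.Set.add, PySem.Set.contains, hm]
        rw [if_neg hm, hadd]
        by_cases hfull : 5 ≤ (out ++ [coerce_field_py item]).length
        · rw [if_pos hfull]
          rcases foldl_add_eq_append_suffix
              ((rest.map coerce_field_py).filter (fun c => c ≠ ""))
              (out ++ [coerce_field_py item]) with ⟨t, ht⟩
          have hlen : (out ++ [coerce_field_py item]).length = 5 := by
            simp at hfull ⊢; omega
          rw [ht, ← hlen, List.take_left]
        · rw [if_neg hfull, ih _ (by omega)]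

-- ===== VERDICT (by name: the statement is the Claim_ definition above) =====
theorem coerce_failures_py_spec : Claim_equal_coerce_failures_py := by
  intro value _
  unfold Spec_coerce_failures_py coerce_failures_py coerce_failures_py_alt
  rw [loop_eq value [] (by simp)]
  show _ = PySem.List.slice
    (PySem.List.dedup ((value.map coerce_field_py).filter (fun c => c ≠ ""))) none (some 5)
  rw [PySem.List.dedup_eq_ofList, PySem.Set.ofList_eq_foldl,
    PySem.List.slice_to _ (by norm_num : (0:Int) ≤ 5)]
  rfl
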